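-- pv_equiv track=rewrite | github.com/Lugulabre/BWT | BWT.py | vec_generate_num
-- ===== SOURCE A (Python) =====
-- def vec_generate_num(seq):
--     '''Classer les bases par numéro de l'apparition de la base
--     (T0, T1, T2...)
--     '''
--     dict_letters = {}
--     vec = []
--
--     for letter in range(len(seq)):
--         if seq[letter] in dict_letters:
--             dict_letters[seq[letter]] += 1
--         else:
--             dict_letters[seq[letter]] = 1
--
--         vec.append(dict_letters[seq[letter]]-1)
--     return vec
-- ===== SOURCE B (Python) =====
-- def vec_generate_num(seq):
--     '''Classer les bases par numéro de l'apparition de la base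
--     (T0, T1, T2...)
--     '''
--     vec = [0] * len(seq)
--     for c in dict.fromkeys(seq):
--         positions = [i for i, x in enumerate(seq) if x == c]
--         for r, i in enumerate(positions):
--             vec[i] = r
--     return vec
-- ===== Notes on version B (the rewrite author's own statement) =====
-- stated objective: alternative
-- what changed: Replaces the single-pass running occurrence dict with a per-character grouping pass: for each distinct character it collects all its positions and scatters the ranks 0,1,2,... into a preallocated output array.
import Mathlib
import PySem

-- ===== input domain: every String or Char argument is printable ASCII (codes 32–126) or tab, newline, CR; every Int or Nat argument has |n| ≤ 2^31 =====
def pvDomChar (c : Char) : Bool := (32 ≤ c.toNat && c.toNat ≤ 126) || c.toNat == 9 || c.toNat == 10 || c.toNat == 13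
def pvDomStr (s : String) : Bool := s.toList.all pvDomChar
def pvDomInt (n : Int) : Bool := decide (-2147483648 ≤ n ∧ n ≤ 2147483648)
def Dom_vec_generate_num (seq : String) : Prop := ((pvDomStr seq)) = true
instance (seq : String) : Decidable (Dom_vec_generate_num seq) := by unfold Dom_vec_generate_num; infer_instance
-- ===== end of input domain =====

-- B replaces A's running occurrence dict with a per-character grouping pass: for each distinct
-- character it collects that character's positions and scatters ranks 0,1,2,... into a
-- preallocated output array (alternative algorithm, not claimed faster).

-- ===== PORT A =====
-- for letter in range(len(seq)): maintain dict_letters, append dict_letters[seq[letter]]-1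
def vec_generate_num (seq : String) : List Int :=
  let cs := seq.toList
  let st := (PySem.List.pyRange 0 (cs.length : Int) 1).foldl
    (fun (st : PySem.Dict Char Int × List Int) (letter : Int) =>
      match PySem.List.pyGet? cs letter with
      | none => st  -- unreachable: letter ranges over range(len(seq))
      | some c =>
        let d := if st.1.contains c then st.1.modify c 0 (· + 1) else st.1.insert c 1
        (d, st.2 ++ [d.getD c 0 - 1]))
    (PySem.Dict.empty, [])
  st.2

-- ===== PORT B =====
-- vec = [0]*len(seq); for c in dict.fromkeys(seq): positions = [i for i, x in enumerate(seq) if x == c];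
-- for r, i in enumerate(positions): vec[i] = r   (i is always a nonnegative in-range index)
def vec_generate_num_alt (seq : String) : List Int :=
  let cs := seq.toList
  let vec := List.replicate cs.length (0 : Int)
  (PySem.List.dedup cs).foldl
    (fun vec c =>
      let positions := (PySem.List.enumerate cs).filterMap
        (fun p => if p.2 = c then some p.1 else none)
      (PySem.List.enumerate positions).foldl
        (fun v q => v.set q.2.toNat q.1) vec)
    vec

-- ===== PRECONDITION & SPEC =====
def Spec_vec_generate_num (seq : String) (out : List Int) : Prop := out = vec_generate_num_alt seq
instance (seq : String) (out : List Int) : Decidable (Spec_vec_generate_num seq out) := by unfold Spec_vec_generate_num; infer_instance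

-- ===== CLAIM (what is proved, stated in full; the proofs are below) =====
def Claim_equal_vec_generate_num : Prop := ∀ (seq : String), Dom_vec_generate_num seq → Spec_vec_generate_num seq (vec_generate_num seq)

-- ===== LEMMAS AND PROOFS =====

-- A's loop body, named for the invariant proof.
def pvStepA (cs : List Char) (st : PySem.Dict Char Int × List Int) (letter : Int) :
    PySem.Dict Char Int × List Int :=
  match PySem.List.pyGet? cs letter with
  | none => st
  | some c =>
    let d := if st.1.contains c then st.1.modify c 0 (· + 1) else st.1.insert c 1
    (d, st.2 ++ [d.getD c 0 - 1])

-- Invariant: with the prefix `pre` already consumed and the dict holding the counts of `pre`,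
-- folding A's body over the remaining indices appends the prefix-counts of `suf`.
theorem pvLoopA (suf : List Char) : ∀ (pre : List Char) (d : PySem.Dict Char Int) (acc : List Int),
    (∀ c, d.getD c 0 = (pre.count c : Int)) →
    ((PySem.List.pyRange (pre.length : Int) ((pre ++ suf).length : Int) 1).foldl
        (pvStepA (pre ++ suf)) (d, acc)).2
      = acc ++ (PySem.List.enumerate suf (pre.length : Int)).map
          (fun p => (((pre ++ suf).take p.1.toNat).count p.2 : Int)) := by
  induction suf with
  | nil =>
    intro pre d acc _
    simp [PySem.List.pyRange_one_eq_nil, PySem.List.enumerate]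
  | cons c rest ih =>
    intro pre d acc hd
    have hlt : (pre.length : Int) < ((pre ++ c :: rest).length : Int) := by
      simp
    rw [PySem.List.pyRange_one_cons hlt, List.foldl_cons]
    have hget : PySem.List.pyGet? (pre ++ c :: rest) (pre.length : Int) = some c := by
      have h1 : (pre.length : Int) = ((pre.length : Nat) : Int) := rfl
      rw [h1, PySem.List.pyGet?_natCast]
      simp
    have hd' : ∀ x, (if d.contains c then d.modify c 0 (· + 1) else d.insert c 1).getD x 0
        = ((pre ++ [c]).count x : Int) := by
      intro x
      by_cases hc : d.contains c
      · simp only [hc, if_true, PySem.Dict.getD_modify]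
        by_cases hx : x = c
        · subst hx; simp [hd, List.count_append]
        · simp [hx, Ne.symm hx, hd, List.count_append]
      · have h0 : d.getD c 0 = 0 := by
          simp only [PySem.Dict.getD]
          rw [(PySem.Dict.get?_eq_none_iff_contains d c).2 (by simpa using hc)]
          rfl
        have hcnt : pre.count c = 0 := by
          have := hd c; rw [h0] at this; exact_mod_cast this.symm
        rw [if_neg hc]
        by_cases hx : x = c
        · subst hx
          simp [PySem.Dict.getD_insert_self, List.count_append, hcnt]
        · rw [PySem.Dict.getD_insert_of_ne _ _ _ hx]
          simp [Ne.symm hx, hd, List.count_append]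
    have hmid : pre ++ c :: rest = (pre ++ [c]) ++ rest := by simp
    have hpl : ((pre ++ [c]).length : Int) = (pre.length : Int) + 1 := by simp
    have := ih (pre ++ [c])
      (if d.contains c then d.modify c 0 (· + 1) else d.insert c 1)
      (acc ++ [(if d.contains c then d.modify c 0 (· + 1) else d.insert c 1).getD c 0 - 1])
      hd'
    rw [← hmid, hpl] at this
    show ((PySem.List.pyRange ((pre.length : Int) + 1) ((pre ++ c :: rest).length : Int) 1).foldl
        (pvStepA (pre ++ c :: rest))
        (pvStepA (pre ++ c :: rest) (d, acc) (pre.length : Int))).2 = _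
    have hstep : pvStepA (pre ++ c :: rest) (d, acc) (pre.length : Int)
        = (if d.contains c then d.modify c 0 (· + 1) else d.insert c 1,
           acc ++ [(if d.contains c then d.modify c 0 (· + 1) else d.insert c 1).getD c 0 - 1]) := by
      simp only [pvStepA, hget]
    rw [hstep, this, PySem.List.enumerate_cons, List.map_cons]
    have hval : (if d.contains c then d.modify c 0 (· + 1) else d.insert c 1).getD c 0 - 1
        = (((pre ++ c :: rest).take ((pre.length : Int)).toNat).count c : Int) := by
      rw [hd' c]
      have : ((pre ++ c :: rest).take ((pre.length : Int)).toNat) = pre := by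
        simp
      rw [this]
      simp [List.count_append]
    rw [hval]
    simp

-- The (rank, position) pairs B's inner loop writes for character c, as a structural recursion.
def pvOcc : List Char → Char → Nat → Nat → List (Int × Int)
  | [], _, _, _ => []
  | x :: xs, c, r, k =>
    if x = c then ((r : Int), (k : Int)) :: pvOcc xs c (r + 1) (k + 1)
    else pvOcc xs c r (k + 1)

-- B's enumerate-of-filtered-positions IS pvOcc.
theorem pvEnumPos (cs : List Char) : ∀ (c : Char) (k r : Nat),
    PySem.List.enumerate
      ((PySem.List.enumerate cs (k : Int)).filterMap
        (fun p => if p.2 = c then some p.1 else none)) (r : Int)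
      = pvOcc cs c r k := by
  induction cs with
  | nil => intro c k r; simp [PySem.List.enumerate_nil, pvOcc]
  | cons x xs ih =>
    intro c k r
    rw [PySem.List.enumerate_cons]
    have h1 : ((k : Int) + 1) = ((k + 1 : Nat) : Int) := by push_cast; ring
    by_cases hx : x = c
    · rw [List.filterMap_cons_some (b := (k : Int)) (by simp [hx]), PySem.List.enumerate_cons,
        pvOcc, if_pos hx]
      have h2 : ((r : Int) + 1) = ((r + 1 : Nat) : Int) := by push_cast; ring
      rw [h1, h2, ih c (k + 1) (r + 1)]
    · rw [List.filterMap_cons_none (by simp [hx]), pvOcc, if_neg hx, h1, ih c (k + 1) r]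

theorem pvOcc_mem (cs : List Char) : ∀ (c : Char) (r k : Nat) (q : Int × Int),
    q ∈ pvOcc cs c r k → ∃ m : Nat, q.2 = (m : Int) ∧ k ≤ m ∧ m < k + cs.length := by
  induction cs with
  | nil => intro c r k q h; simp [pvOcc] at h
  | cons x xs ih =>
    intro c r k q h
    by_cases hx : x = c
    · rw [pvOcc, if_pos hx] at h
      rcases List.mem_cons.1 h with h | h
      · exact ⟨k, by simp [h], le_refl _, by simp⟩
      · rcases ih c (r + 1) (k + 1) q h with ⟨m, h1, h2, h3⟩
        exact ⟨m, h1, by omega, by simp at *; omega⟩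
    · rw [pvOcc, if_neg hx] at h
      rcases ih c r (k + 1) q h with ⟨m, h1, h2, h3⟩
      exact ⟨m, h1, by omega, by simp at *; omega⟩

theorem pvOcc_pairwise (cs : List Char) : ∀ (c : Char) (r k : Nat),
    (pvOcc cs c r k).Pairwise (fun a b => a.2.toNat ≠ b.2.toNat) := by
  induction cs with
  | nil => intro c r k; simp [pvOcc]
  | cons x xs ih =>
    intro c r k
    by_cases hx : x = c
    · rw [pvOcc, if_pos hx]
      refine List.Pairwise.cons ?_ (ih c (r + 1) (k + 1))
      intro q hq
      rcases pvOcc_mem xs c (r + 1) (k + 1) q hq with ⟨m, h1, h2, _⟩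
      simp [h1]; omega
    · rw [pvOcc, if_neg hx]; exact ih c r (k + 1)

-- First (and only) pair of pvOcc at position n: rank = r + (count of c before n).
theorem pvOcc_find (cs : List Char) : ∀ (c : Char) (r k n : Nat),
    (pvOcc cs c r k).find? (fun q => q.2.toNat == n) =
      if k ≤ n ∧ n - k < cs.length ∧ cs[n - k]? = some c
      then some (((r : Int) + ((cs.take (n - k)).count c : Int), (n : Int)))
      else none := by
  induction cs with
  | nil => intro c r k n; simp [pvOcc]
  | cons x xs ih =>
    intro c r k n
    by_cases hx : x = c
    · rw [pvOcc, if_pos hx]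
      by_cases hkn : k = n
      · subst hkn
        rw [List.find?_cons_of_pos (by simp)]
        have : k ≤ k ∧ k - k < (x :: xs).length ∧ (x :: xs)[k - k]? = some c := by
          refine ⟨le_refl _, by simp, ?_⟩
          simp [hx]
        rw [if_pos this]
        simp [Nat.sub_self]
      · rw [List.find?_cons_of_neg (by simp [hkn]), ih c (r + 1) (k + 1) n]
        by_cases hc : k + 1 ≤ n ∧ n - (k + 1) < xs.length ∧ xs[n - (k + 1)]? = some c
        · rw [if_pos hc]
          have hc' : k ≤ n ∧ n - k < (x :: xs).length ∧ (x :: xs)[n - k]? = some c := by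
            refine ⟨by omega, by simp; omega, ?_⟩
            have : n - k = (n - (k + 1)) + 1 := by omega
            rw [this]; simpa using hc.2.2
          rw [if_pos hc']
          have ht : (x :: xs).take (n - k) = x :: xs.take (n - (k + 1)) := by
            have : n - k = (n - (k + 1)) + 1 := by omega
            rw [this, List.take_succ_cons]
          rw [ht]
          simp [hx, List.count_cons]
          push_cast; ring
        · rw [if_neg hc]
          rw [if_neg (by intro h; exact hc ⟨by omega, by simp at h; omega, by
            have : n - (k + 1) = (n - k) - 1 := by omega
            rw [this]
            rcases h with ⟨h1, h2, h3⟩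
            have hnk : 1 ≤ n - k := by omega
            have : n - k = ((n - k) - 1) + 1 := by omega
            rw [this] at h3; simpa using h3⟩)]
    · rw [pvOcc, if_neg hx, ih c r (k + 1) n]
      by_cases hc : k + 1 ≤ n ∧ n - (k + 1) < xs.length ∧ xs[n - (k + 1)]? = some c
      · rw [if_pos hc]
        have hc' : k ≤ n ∧ n - k < (x :: xs).length ∧ (x :: xs)[n - k]? = some c := by
          refine ⟨by omega, by simp; omega, ?_⟩
          have : n - k = (n - (k + 1)) + 1 := by omega
          rw [this]; simpa using hc.2.2
        rw [if_pos hc']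
        have ht : (x :: xs).take (n - k) = x :: xs.take (n - (k + 1)) := by
          have : n - k = (n - (k + 1)) + 1 := by omega
          rw [this, List.take_succ_cons]
        rw [ht]
        simp [hx]
      · rw [if_neg hc]
        by_cases hkn : k = n
        · subst hkn
          rw [if_neg (by intro h; rcases h with ⟨_, _, h3⟩; simp at h3; exact hx h3)]
        · rw [if_neg (by intro h; exact hc ⟨by omega, by simp at h; omega, by
            have : n - (k + 1) = (n - k) - 1 := by omega
            rw [this]
            rcases h with ⟨h1, h2, h3⟩
            have : n - k = ((n - k) - 1) + 1 := by omega
            rw [this] at h3; simpa using h3⟩)]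

-- Folding set-writes with pairwise-distinct indices: length is preserved …
theorem pvFoldSet_length (L : List (Int × Int)) : ∀ (v : List Int),
    (L.foldl (fun v q => v.set q.2.toNat q.1) v).length = v.length := by
  induction L with
  | nil => intro v; rfl
  | cons q L ih => intro v; rw [List.foldl_cons, ih]; simp

-- … and the result at any index is the first written pair there, else the old value.
theorem pvFoldSet (L : List (Int × Int)) : ∀ (v : List Int) (n : Nat),
    L.Pairwise (fun a b => a.2.toNat ≠ b.2.toNat) →
    (∀ q ∈ L, q.2.toNat < v.length) →
    (L.foldl (fun v q => v.set q.2.toNat q.1) v)[n]? =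
      match L.find? (fun q => q.2.toNat == n) with
      | some q => some q.1
      | none => v[n]? := by
  induction L with
  | nil => intro v n _ _; rfl
  | cons q L ih =>
    intro v n hpw hb
    have hpw' := (List.pairwise_cons.1 hpw).2
    have hhead := (List.pairwise_cons.1 hpw).1
    rw [List.foldl_cons]
    by_cases hqn : q.2.toNat = n
    · rw [List.find?_cons_of_pos (by simp [hqn])]
      have hnone : L.find? (fun p => p.2.toNat == n) = none := by
        rw [List.find?_eq_none]
        intro p hp
        simp [← hqn]
        exact fun h => (hhead p hp) h.symm
      rw [ih _ n hpw' (by intro p hp; rw [List.length_set]; exact hb p (List.mem_cons_of_mem _ hp)),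
        hnone, hqn]
      exact List.getElem?_set_self (by rw [← hqn]; exact hb q (List.mem_cons_self))
    · rw [List.find?_cons_of_neg (by simp [hqn])]
      rw [ih _ n hpw' (by intro p hp; rw [List.length_set]; exact hb p (List.mem_cons_of_mem _ hp))]
      cases hf : L.find? (fun p => p.2.toNat == n) with
      | some p => rfl
      | none => simp [List.getElem?_set_ne hqn]

-- One pass of B's outer loop, at index n.
theorem pvInner (cs : List Char) (c : Char) (v : List Int) (hv : v.length = cs.length) (n : Nat) :
    ((PySem.List.enumerate
        ((PySem.List.enumerate cs).filterMap (fun p => if p.2 = c then some p.1 else none))).foldl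
        (fun v q => v.set q.2.toNat q.1) v)[n]? =
      if cs[n]? = some c then some (((cs.take n).count c : Int)) else v[n]? := by
  have he : PySem.List.enumerate
      ((PySem.List.enumerate cs).filterMap (fun p => if p.2 = c then some p.1 else none))
      = pvOcc cs c 0 0 := by
    have h0 : (0 : Int) = ((0 : Nat) : Int) := rfl
    have := pvEnumPos cs c 0 0
    simpa using this
  rw [he]
  rw [pvFoldSet _ v n (pvOcc_pairwise cs c 0 0)
    (by intro q hq
        rcases pvOcc_mem cs c 0 0 q hq with ⟨m, h1, _, h3⟩
        rw [h1, hv]; simpa using h3)]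
  rw [pvOcc_find cs c 0 0 n]
  by_cases hc : cs[n]? = some c
  · have hn : n < cs.length := by
      rcases List.getElem?_eq_some_iff.1 hc with ⟨h, _⟩; exact h
    rw [if_pos ⟨Nat.zero_le _, by simpa using hn, by simpa using hc⟩]
    simp [hc]
  · rw [if_neg (by intro h; exact hc (by simpa using h.2.2))]
    simp [hc]

-- B's whole outer loop, at index n.
theorem pvOuter (cs : List Char) : ∀ (S : List Char) (v : List Int), v.length = cs.length →
    ∀ n : Nat,
    (S.foldl
      (fun vec c =>
        (PySem.List.enumerate
          ((PySem.List.enumerate cs).filterMap (fun p => if p.2 = c then some p.1 else none))).foldl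
          (fun v q => v.set q.2.toNat q.1) vec) v)[n]? =
      match cs[n]? with
      | some d => if d ∈ S then some (((cs.take n).count d : Int)) else v[n]?
      | none => v[n]? := by
  intro S
  induction S with
  | nil => intro v _ n; cases cs[n]? <;> simp
  | cons c S ih =>
    intro v hv n
    rw [List.foldl_cons]
    have hlen : ((PySem.List.enumerate
        ((PySem.List.enumerate cs).filterMap (fun p => if p.2 = c then some p.1 else none))).foldl
        (fun v q => v.set q.2.toNat q.1) v).length = cs.length := by
      rw [pvFoldSet_length, hv]
    rw [ih _ hlen n, pvInner cs c v hv n]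
    cases hcn : cs[n]? with
    | none => simp [hcn]
    | some d =>
      by_cases hdS : d ∈ S
      · simp [hdS]
      · by_cases hdc : d = c
        · subst hdc; simp [hdS, hcn]
        · simp [hdS, hdc, hcn]

theorem pvEnumGet (cs : List Char) : ∀ (s : Int) (n : Nat),
    (PySem.List.enumerate cs s)[n]? = cs[n]?.map (fun x => (s + (n : Int), x)) := by
  induction cs with
  | nil => intro s n; simp [PySem.List.enumerate_nil]
  | cons x xs ih =>
    intro s n
    rw [PySem.List.enumerate_cons]
    cases n with
    | zero => simp
    | succ m =>
      simp only [List.getElem?_cons_succ, ih (s + 1) m]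
      cases xs[m]? <;> simp [Nat.cast_succ] <;> ring

-- B computes the prefix-count map.
theorem pvAltChar (seq : String) :
    vec_generate_num_alt seq
      = (PySem.List.enumerate seq.toList).map
          (fun p => ((seq.toList.take p.1.toNat).count p.2 : Int)) := by
  unfold vec_generate_num_alt
  apply List.ext_getElem?
  intro n
  rw [pvOuter seq.toList (PySem.List.dedup seq.toList) (List.replicate seq.toList.length 0)
    (by simp) n]
  rw [List.getElem?_map, pvEnumGet seq.toList 0 n]
  cases hcn : seq.toList[n]? with
  | none =>
    have hlen : seq.toList.length ≤ n := by
      rw [← List.getElem?_eq_none_iff]; exact hcn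
    simp
    simpa using hlen
  | some d =>
    have hd : d ∈ seq.toList := List.mem_of_getElem? hcn
    have hdd : d ∈ PySem.List.dedup seq.toList := by
      rw [PySem.List.mem_dedup]; exact hd
    simp [hd]

-- ===== VERDICT (by name: the statement is the Claim_ definition above) =====
theorem vec_generate_num_spec : Claim_equal_vec_generate_num := by
  intro seq _
  show vec_generate_num seq = vec_generate_num_alt seq
  unfold vec_generate_num
  have h := pvLoopA seq.toList [] PySem.Dict.empty [] (by
    intro c; simp [PySem.Dict.getD, PySem.Dict.empty, PySem.Dict.get?])
  simp only [List.nil_append, List.length_nil, Nat.cast_zero] at h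
  rw [pvAltChar]
  simpa [pvStepA] using h
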